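-- pv_equiv track=rewrite | github.com/ulyssesrr/composable_kernel | script/shuffle_v_mfma/shuffle_v_mfma.py | gen_new_asm_txt
-- ===== SOURCE A (Python) =====
-- def gen_new_asm_txt(interleave_vmfma, interleave_other, reshuffle_inst_slot, asm_txt, core_loop_txt):
--     new_asm_txt = []
--     new_core_loop = []
--     update_for_loop = 0
--
--     reshuffle_start_point = min(interleave_vmfma[0][1], interleave_other[0][1])
--
--     for i in range(len(core_loop_txt)):
--         if i >= reshuffle_start_point and (i - reshuffle_start_point) < len(reshuffle_inst_slot):
--             new_core_loop.append(reshuffle_inst_slot[i - reshuffle_start_point])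
--         else:
--             new_core_loop.append(core_loop_txt[i])
--
--     for i in range(len(asm_txt)):
--         if update_for_loop == 0:
--             if asm_txt[i] == new_core_loop[0]:
--                 update_for_loop = 1
--         if len(new_core_loop) != 0 and update_for_loop:
--             new_asm_txt.append(new_core_loop.pop(0))
--         else:
--             new_asm_txt.append(asm_txt[i])
--
--     #self.new_asm_txt = new_asm_txt
--
--     return new_asm_txt
-- ===== SOURCE B (Python) =====
-- def gen_new_asm_txt(interleave_vmfma, interleave_other, reshuffle_inst_slot, asm_txt, core_loop_txt):
--     rsp = min(interleave_vmfma[0][1], interleave_other[0][1])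
--     m = len(reshuffle_inst_slot)
--     nc = len(core_loop_txt)
--     lo = min(max(rsp, 0), nc)
--     hi = max(lo, min(nc, rsp + m))
--     new_core_loop = core_loop_txt[:lo] + reshuffle_inst_slot[lo - rsp:hi - rsp] + core_loop_txt[hi:]
--     if not new_core_loop:
--         return list(asm_txt)
--     try:
--         k = asm_txt.index(new_core_loop[0])
--     except ValueError:
--         return list(asm_txt)
--     n = len(asm_txt)
--     return asm_txt[:k] + new_core_loop[:n - k] + asm_txt[k + len(new_core_loop):]
-- ===== Notes on version B (the rewrite author's own statement) =====
-- stated objective: faster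
-- what changed: B builds the overlaid core loop with three slice copies instead of an index-by-index append loop, and replaces A's per-line scan with repeated pop(0) by a single list.index lookup plus three slice copies, removing the quadratic pop(0) shifting.
import Mathlib
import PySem

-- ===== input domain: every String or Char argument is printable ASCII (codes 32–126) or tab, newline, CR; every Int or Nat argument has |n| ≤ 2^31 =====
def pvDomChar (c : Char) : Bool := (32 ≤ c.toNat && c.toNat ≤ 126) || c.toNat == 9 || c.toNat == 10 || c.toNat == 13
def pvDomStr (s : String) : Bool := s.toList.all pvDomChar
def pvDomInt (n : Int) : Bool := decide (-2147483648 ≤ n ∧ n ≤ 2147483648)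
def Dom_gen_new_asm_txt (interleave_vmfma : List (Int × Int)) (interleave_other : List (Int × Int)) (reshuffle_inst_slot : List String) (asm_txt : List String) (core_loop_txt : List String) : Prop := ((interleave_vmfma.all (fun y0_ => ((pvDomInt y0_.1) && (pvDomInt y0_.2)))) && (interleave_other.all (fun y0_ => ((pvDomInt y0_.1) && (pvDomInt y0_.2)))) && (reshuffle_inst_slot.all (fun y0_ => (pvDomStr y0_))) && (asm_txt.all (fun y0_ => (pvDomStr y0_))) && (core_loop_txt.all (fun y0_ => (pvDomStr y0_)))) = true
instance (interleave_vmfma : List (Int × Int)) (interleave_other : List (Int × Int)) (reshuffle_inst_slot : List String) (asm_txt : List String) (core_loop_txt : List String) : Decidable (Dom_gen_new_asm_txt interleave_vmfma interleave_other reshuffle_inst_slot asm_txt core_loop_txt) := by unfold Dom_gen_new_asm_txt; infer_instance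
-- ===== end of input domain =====

-- ===== PORT A =====
-- B replaces the pop(0)-based splice loop with one index lookup and slice copies; objective: faster (O(n+m) vs O(n*m)).
-- Pre_ excludes exactly the inputs where Python A raises IndexError.

-- A's first loop: overlay reshuffle_inst_slot onto core_loop_txt starting at rsp
def pvBuildA (rsp : Int) (slot core : List String) : List String :=
  (PySem.List.pyRange 0 (core.length : Int)).foldl
    (fun acc i =>
      if rsp ≤ i ∧ i - rsp < (slot.length : Int) then acc ++ [PySem.List.pyGetD slot (i - rsp) ""]
      else acc ++ [PySem.List.pyGetD core i ""]) []

-- A's second loop: state = (remaining new_core_loop, update_for_loop); new_asm built element by element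
def pvLoopA : List String → List String → Bool → List String
  | [], _, _ => []
  | a :: rest, ncl, upd =>
    let upd' := if upd then true else a == PySem.List.pyGetD ncl 0 ""
    if ncl.isEmpty = false ∧ upd' = true then
      PySem.List.pyGetD ncl 0 "" :: pvLoopA rest ncl.tail upd'
    else a :: pvLoopA rest ncl upd'

def gen_new_asm_txt (interleave_vmfma : List (Int × Int)) (interleave_other : List (Int × Int)) (reshuffle_inst_slot : List String) (asm_txt : List String) (core_loop_txt : List String) : List String :=
  let rsp := min (PySem.List.pyGetD interleave_vmfma 0 (0, 0)).2 (PySem.List.pyGetD interleave_other 0 (0, 0)).2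
  pvLoopA asm_txt (pvBuildA rsp reshuffle_inst_slot core_loop_txt) false

-- ===== PORT B =====
-- B's overlay via three slice copies
def pvBuildB (rsp : Int) (slot core : List String) : List String :=
  let m : Int := slot.length
  let nc : Int := core.length
  let lo := min (max rsp 0) nc
  let hi := max lo (min nc (rsp + m))
  PySem.List.slice core none (some lo) ++ PySem.List.slice slot (some (lo - rsp)) (some (hi - rsp)) ++
    PySem.List.slice core (some hi) none

-- B's splice: locate the match once, then copy the three segments
def pvSpliceB (asm ncl : List String) : List String :=
  match ncl with
  | [] => asm
  | h :: _ =>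
    match PySem.List.index? asm h with
    | none => asm
    | some k =>
      PySem.List.slice asm none (some (k : Int)) ++
        PySem.List.slice ncl none (some ((asm.length : Int) - (k : Int))) ++
        PySem.List.slice asm (some ((k : Int) + (ncl.length : Int))) none

def gen_new_asm_txt_alt (interleave_vmfma : List (Int × Int)) (interleave_other : List (Int × Int)) (reshuffle_inst_slot : List String) (asm_txt : List String) (core_loop_txt : List String) : List String :=
  let rsp := min (PySem.List.pyGetD interleave_vmfma 0 (0, 0)).2 (PySem.List.pyGetD interleave_other 0 (0, 0)).2
  pvSpliceB asm_txt (pvBuildB rsp reshuffle_inst_slot core_loop_txt)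

-- ===== PRECONDITION & SPEC =====
-- Pre_ excludes exactly the inputs where Python A raises IndexError: an empty interleave list
-- (interleave_vmfma[0] / interleave_other[0]), or an empty core_loop_txt with a nonempty asm_txt
-- (new_core_loop[0] on an empty list).
def Pre_gen_new_asm_txt (interleave_vmfma : List (Int × Int)) (interleave_other : List (Int × Int)) (reshuffle_inst_slot : List String) (asm_txt : List String) (core_loop_txt : List String) : Prop :=
  interleave_vmfma ≠ [] ∧ interleave_other ≠ [] ∧ (asm_txt = [] ∨ core_loop_txt ≠ [])
instance (interleave_vmfma : List (Int × Int)) (interleave_other : List (Int × Int)) (reshuffle_inst_slot : List String) (asm_txt : List String) (core_loop_txt : List String) : Decidable (Pre_gen_new_asm_txt interleave_vmfma interleave_other reshuffle_inst_slot asm_txt core_loop_txt) := by unfold Pre_gen_new_asm_txt; infer_instance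

def pvWitness_gen_new_asm_txt : (List (Int × Int)) × (List (Int × Int)) × List String × List String × List String :=
  ([(0, 1)], [(0, 2)], ["s0"], ["a", "x", "b"], ["x", "b"])

def Spec_gen_new_asm_txt (interleave_vmfma : List (Int × Int)) (interleave_other : List (Int × Int)) (reshuffle_inst_slot : List String) (asm_txt : List String) (core_loop_txt : List String) (out : List String) : Prop := out = gen_new_asm_txt_alt interleave_vmfma interleave_other reshuffle_inst_slot asm_txt core_loop_txt
instance (interleave_vmfma : List (Int × Int)) (interleave_other : List (Int × Int)) (reshuffle_inst_slot : List String) (asm_txt : List String) (core_loop_txt : List String) (out : List String) : Decidable (Spec_gen_new_asm_txt interleave_vmfma interleave_other reshuffle_inst_slot asm_txt core_loop_txt out) := by unfold Spec_gen_new_asm_txt; infer_instance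

-- ===== CLAIM (what is proved, stated in full; the proofs are below) =====
def Claim_equal_gen_new_asm_txt : Prop := ∀ (interleave_vmfma : List (Int × Int)) (interleave_other : List (Int × Int)) (reshuffle_inst_slot : List String) (asm_txt : List String) (core_loop_txt : List String), Dom_gen_new_asm_txt interleave_vmfma interleave_other reshuffle_inst_slot asm_txt core_loop_txt → Pre_gen_new_asm_txt interleave_vmfma interleave_other reshuffle_inst_slot asm_txt core_loop_txt → Spec_gen_new_asm_txt interleave_vmfma interleave_other reshuffle_inst_slot asm_txt core_loop_txt (gen_new_asm_txt interleave_vmfma interleave_other reshuffle_inst_slot asm_txt core_loop_txt)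
-- ===== LEMMAS AND PROOFS =====

-- the overlay that both builds compute, index by index
def pvOverlay (rsp : Int) (slot core : List String) (n : Nat) : String :=
  if rsp ≤ (n : Int) ∧ (n : Int) - rsp < (slot.length : Int) then slot.getD ((n : Int) - rsp).toNat ""
  else core.getD n ""

theorem pvBuildA_eq_map (rsp : Int) (slot core : List String) :
    pvBuildA rsp slot core = (List.range core.length).map (pvOverlay rsp slot core) := by
  unfold pvBuildA
  rw [PySem.List.pyRange_zero_nat, List.foldl_map]
  have hfun : (fun (acc : List String) (k : Nat) =>
      if rsp ≤ (k : Int) ∧ (k : Int) - rsp < (slot.length : Int) then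
        acc ++ [PySem.List.pyGetD slot ((k : Int) - rsp) ""]
      else acc ++ [PySem.List.pyGetD core (k : Int) ""]) =
      fun acc k => acc ++ [pvOverlay rsp slot core k] := by
    funext acc k
    unfold pvOverlay
    by_cases h : rsp ≤ (k : Int) ∧ (k : Int) - rsp < (slot.length : Int)
    · rw [if_pos h, if_pos h, PySem.List.pyGetD_of_nonneg _ _ (by omega)]
    · rw [if_neg h, if_neg h, PySem.List.pyGetD_natCast]
  rw [hfun, PySem.List.foldl_append_singleton_eq_map, List.nil_append]

theorem pvBuildB_eq_map (rsp : Int) (slot core : List String) :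
    pvBuildB rsp slot core = (List.range core.length).map (pvOverlay rsp slot core) := by
  simp only [pvBuildB]
  set lo := min (max rsp 0) (core.length : Int) with hlo
  set hi := max lo (min (core.length : Int) (rsp + (slot.length : Int))) with hhi
  have h0 : 0 ≤ lo := by omega
  have hlh : lo ≤ hi := by omega
  have hhc : hi ≤ (core.length : Int) := by omega
  rw [PySem.List.slice_to core h0, PySem.List.slice_from core (by omega : (0:Int) ≤ hi)]
  have hmid : PySem.List.slice slot (some (lo - rsp)) (some (hi - rsp)) =
      (slot.drop (lo - rsp).toNat).take (hi.toNat - lo.toNat) := by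
    by_cases hneg : lo - rsp < 0
    · have hEq : hi = lo := by omega
      rw [hEq]
      simp [PySem.List.slice, PySem.List.clampIdx]
    · by_cases hlt : hi = lo
      · rw [hlt]
        simp [PySem.List.slice, PySem.List.clampIdx]
      · have hhm : hi - rsp ≤ (slot.length : Int) := by omega
        simp only [PySem.List.slice, PySem.List.clampIdx]
        rw [if_neg (by omega : ¬(hi - rsp < 0)), if_neg (by omega : ¬(lo - rsp < 0))]
        have e1 : min (lo - rsp).toNat slot.length = (lo - rsp).toNat := by omega
        have e2 : min (hi - rsp).toNat slot.length - (lo - rsp).toNat = hi.toNat - lo.toNat := by omega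
        rw [e1, e2]
  rw [hmid]
  have hlenmid : ((slot.drop (lo - rsp).toNat).take (hi.toNat - lo.toNat)).length = hi.toNat - lo.toNat := by
    simp [List.length_take, List.length_drop]
    omega
  have hlA : (core.take lo.toNat).length = lo.toNat := by simp; omega
  apply List.ext_getElem
  · simp [hlenmid]
    omega
  · intro i h1 h2
    simp only [List.length_map, List.length_range] at h2
    rw [List.getElem_map, List.getElem_range]
    by_cases hc1 : i < lo.toNat
    · rw [List.getElem_append_left (by simp [hlA, hlenmid]; omega),
        List.getElem_append_left (by rw [hlA]; omega), List.getElem_take]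
      unfold pvOverlay
      rw [if_neg (by omega)]
      exact (List.getD_eq_getElem _ _ h2).symm
    · by_cases hc2 : i < hi.toNat
      · rw [List.getElem_append_left (by simp [hlA, hlenmid]; omega),
          List.getElem_append_right (by rw [hlA]; omega), List.getElem_take, List.getElem_drop]
        unfold pvOverlay
        rw [if_pos (by constructor <;> omega)]
        simp only [hlA]
        have hix : (lo - rsp).toNat + (i - lo.toNat) = ((i : Int) - rsp).toNat := by omega
        rw [List.getD_eq_getElem _ _ (by omega)]
        simp [hix]
      · rw [List.getElem_append_right (by simp [hlA, hlenmid]; omega), List.getElem_drop]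
        unfold pvOverlay
        rw [if_neg (by omega)]
        rw [List.getD_eq_getElem _ _ h2]
        simp only [List.length_append, hlA, hlenmid]
        simp only [show hi.toNat + (i - (lo.toNat + (hi.toNat - lo.toNat))) = i from by omega]

theorem pvLoopA_drain (xs : List String) : ∀ ncl : List String,
    pvLoopA xs ncl true = ncl.take xs.length ++ xs.drop ncl.length := by
  induction xs with
  | nil => intro ncl; simp [pvLoopA]
  | cons a rest ih =>
    intro ncl
    cases ncl with
    | nil => simp [pvLoopA, ih]
    | cons h t => simp [pvLoopA, PySem.List.pyGetD, ih]

theorem pvLoopA_scan (h : String) (t : List String) : ∀ xs : List String,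
    pvLoopA xs (h :: t) false =
      match List.idxOf? h xs with
      | none => xs
      | some k => xs.take k ++ (h :: t).take (xs.length - k) ++ xs.drop (k + (h :: t).length) := by
  intro xs
  induction xs with
  | nil => simp [pvLoopA]
  | cons a rest ih =>
    rw [List.idxOf?_cons]
    by_cases hah : (a == h) = true
    · have ha : a = h := by simpa using hah
      simp only [pvLoopA, PySem.List.pyGetD, ha]
      simp [pvLoopA_drain]
    · rw [Bool.not_eq_true] at hah
      have hne : ¬ a = h := by simpa using hah
      have hb : (a == (PySem.List.pyGet? (h :: t) (0 : Int)).getD "") = false := by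
        simp [PySem.List.pyGet?, PySem.List.pyIdx?, hne]
      simp only [pvLoopA, PySem.List.pyGetD]
      rw [if_neg (by simp [hne, PySem.List.pyGet?, PySem.List.pyIdx?])]
      rw [hb, show (if (false = true) then true else false) = false from rfl, ih]
      cases hk : List.idxOf? h rest with
      | none => simp [hne]
      | some k =>
        simp only [Option.map_some, List.length_cons]
        simp [hne]
        rw [show k + 1 + (t.length + 1) = (k + (t.length + 1)) + 1 from by omega,
          List.drop_succ_cons]

theorem pvSpliceB_eq (asm : List String) (h : String) (t : List String) :
    pvSpliceB asm (h :: t) =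
      match List.idxOf? h asm with
      | none => asm
      | some k => asm.take k ++ (h :: t).take (asm.length - k) ++ asm.drop (k + (h :: t).length) := by
  show (match PySem.List.index? asm h with
    | none => asm
    | some k =>
      PySem.List.slice asm none (some (k : Int)) ++
        PySem.List.slice (h :: t) none (some ((asm.length : Int) - (k : Int))) ++
        PySem.List.slice asm (some ((k : Int) + (((h :: t).length : Int)))) none) = _
  rw [PySem.List.index?_eq_idxOf?]
  cases hk : List.idxOf? h asm with
  | none => rfl
  | some k =>
    obtain ⟨hklen, -⟩ := List.idxOf?_eq_some_iff.mp hk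
    dsimp only
    rw [PySem.List.slice_to _ (by omega : (0:Int) ≤ (k:Int)),
      PySem.List.slice_to _ (by omega : (0:Int) ≤ ((asm.length : Int) - (k : Int))),
      PySem.List.slice_from _ (by omega : (0:Int) ≤ ((k : Int) + (((h :: t).length : Int)))),
      show ((k : Int)).toNat = k from by omega,
      show (((asm.length : Int) - (k : Int))).toNat = asm.length - k from by omega,
      show (((k : Int) + (((h :: t).length : Int)))).toNat = k + (h :: t).length from by omega]

theorem pvFinal (rsp : Int) (slot asm core : List String)
    (hpre : asm = [] ∨ core ≠ []) :
    pvLoopA asm (pvBuildA rsp slot core) false = pvSpliceB asm (pvBuildB rsp slot core) := by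
  have hAB : pvBuildA rsp slot core = pvBuildB rsp slot core :=
    (pvBuildA_eq_map rsp slot core).trans (pvBuildB_eq_map rsp slot core).symm
  rw [hAB]
  cases hN : pvBuildB rsp slot core with
  | nil =>
    have hcore : core = [] := by
      have hl := congrArg List.length ((pvBuildB_eq_map rsp slot core).symm.trans hN)
      simpa using hl
    have hasm : asm = [] := by
      rcases hpre with h | h
      · exact h
      · exact absurd hcore h
    subst hasm
    rfl
  | cons h t =>
    rw [pvLoopA_scan, pvSpliceB_eq]

-- ===== VERDICT (by name: the statement is the Claim_ definition above) =====
theorem gen_new_asm_txt_spec : Claim_equal_gen_new_asm_txt := by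
  intro iv io slot asm core _ hpre
  unfold Spec_gen_new_asm_txt gen_new_asm_txt gen_new_asm_txt_alt
  exact pvFinal _ slot asm core hpre.2.2
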